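-- pv_equiv track=rewrite | github.com/EBI-Metagenomics/mett-dataportal-client | scripts/generate-api-docs.py | categorize_endpoint
-- ===== SOURCE A (Python) =====
-- from typing import Dict, List, Optional, Tuple
--
-- CATEGORY_MAP = {
--     'System': ['Health', 'Features', 'Metadata'],
--     'Species': ['Species'],
--     'Genomes': ['Genomes'],
--     'Genes': ['Genes'],
--     'Drugs': ['Drugs'],
--     'Proteomics': ['Proteomics'],
--     'Essentiality': ['Essentiality'],
--     'Fitness': ['Fitness'],
--     'Mutant Growth': ['MutantGrowth'],
--     'Reactions': ['Reactions'],
--     'Operons': ['Operons'],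
--     'Orthologs': ['Orthologs'],
--     'PPI': ['PPI', 'ProteinProteinInteractions'],
--     'TTP': ['TTP', 'PooledTTP'],
--     'PyHMMER': ['PyHMMER', 'Pyhmmer'],
-- }
--
-- def categorize_endpoint(path: str, tags: List[str]) -> str:
--     """Categorize endpoint based on path and tags."""
--     path_lower = path.lower()
--
--     # Check tags first
--     for category, tag_list in CATEGORY_MAP.items():
--         if any(tag in tags for tag in tag_list):
--             return category
--
--     # Check path
--     if '/health' in path or '/features' in path or '/metadata' in path:
--         return 'System'
--     elif '/species' in path:
--         return 'Species'
--     elif '/genomes' in path: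
--         return 'Genomes'
--     elif '/genes' in path:
--         return 'Genes'
--     elif '/drugs' in path:
--         return 'Drugs'
--     elif '/proteomics' in path:
--         return 'Proteomics'
--     elif '/essentiality' in path:
--         return 'Essentiality'
--     elif '/fitness' in path:
--         return 'Fitness'
--     elif '/mutant-growth' in path:
--         return 'Mutant Growth'
--     elif '/reactions' in path:
--         return 'Reactions'
--     elif '/operons' in path:
--         return 'Operons'
--     elif '/orthologs' in path:
--         return 'Orthologs'
--     elif '/ppi' in path:
--         return 'PPI'
--     elif '/ttp' in path:
--         return 'TTP'
--     elif '/pyhmmer' in path: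
--         return 'PyHMMER'
--
--     return 'Other'
-- ===== SOURCE B (Python) =====
-- # Different algorithm: instead of scanning the rule table and testing each rule
-- # tag for membership in `tags`, iterate over the INPUT tags once, look each tag
-- # up in a precomputed tag -> (priority, category) dict, and keep the rule with
-- # the minimal priority; the path stage keeps the same min-priority accumulator
-- # over an indexed rule list.
--
-- TAG_RULE = {
--     'Health': (0, 'System'), 'Features': (0, 'System'), 'Metadata': (0, 'System'),
--     'Species': (1, 'Species'),
--     'Genomes': (2, 'Genomes'),
--     'Genes': (3, 'Genes'),
--     'Drugs': (4, 'Drugs'),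
--     'Proteomics': (5, 'Proteomics'),
--     'Essentiality': (6, 'Essentiality'),
--     'Fitness': (7, 'Fitness'),
--     'MutantGrowth': (8, 'Mutant Growth'),
--     'Reactions': (9, 'Reactions'),
--     'Operons': (10, 'Operons'),
--     'Orthologs': (11, 'Orthologs'),
--     'PPI': (12, 'PPI'), 'ProteinProteinInteractions': (12, 'PPI'),
--     'TTP': (13, 'TTP'), 'PooledTTP': (13, 'TTP'),
--     'PyHMMER': (14, 'PyHMMER'), 'Pyhmmer': (14, 'PyHMMER'),
-- }
--
-- PATH_RULE = [
--     (0, '/health', 'System'), (1, '/features', 'System'), (2, '/metadata', 'System'),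
--     (3, '/species', 'Species'),
--     (4, '/genomes', 'Genomes'),
--     (5, '/genes', 'Genes'),
--     (6, '/drugs', 'Drugs'),
--     (7, '/proteomics', 'Proteomics'),
--     (8, '/essentiality', 'Essentiality'),
--     (9, '/fitness', 'Fitness'),
--     (10, '/mutant-growth', 'Mutant Growth'),
--     (11, '/reactions', 'Reactions'),
--     (12, '/operons', 'Operons'),
--     (13, '/orthologs', 'Orthologs'),
--     (14, '/ppi', 'PPI'),
--     (15, '/ttp', 'TTP'),
--     (16, '/pyhmmer', 'PyHMMER'),
-- ]
--
-- def categorize_endpoint(path, tags):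
--     """Categorize endpoint based on path and tags."""
--     best = None
--     for tag in tags:
--         hit = TAG_RULE.get(tag)
--         if hit is not None and (best is None or hit[0] < best[0]):
--             best = hit
--     if best is None:
--         for prio, sub, cat in PATH_RULE:
--             if sub in path and (best is None or prio < best[0]):
--                 best = (prio, cat)
--     return best[1] if best is not None else 'Other'
-- ===== Notes on version B (the rewrite author's own statement) =====
-- stated objective: faster
-- what changed: Inverts the tag stage: instead of scanning CATEGORY_MAP and testing each of its 20 rule tags for membership in tags (rescanning tags each time), B iterates once over the input tags, looks each up in a precomputed tag->(priority,category) dict and keeps the minimal-priority hit; the path if/elif chain becomes a min-priority accumulator over an indexed substring rule list.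
import Mathlib
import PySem

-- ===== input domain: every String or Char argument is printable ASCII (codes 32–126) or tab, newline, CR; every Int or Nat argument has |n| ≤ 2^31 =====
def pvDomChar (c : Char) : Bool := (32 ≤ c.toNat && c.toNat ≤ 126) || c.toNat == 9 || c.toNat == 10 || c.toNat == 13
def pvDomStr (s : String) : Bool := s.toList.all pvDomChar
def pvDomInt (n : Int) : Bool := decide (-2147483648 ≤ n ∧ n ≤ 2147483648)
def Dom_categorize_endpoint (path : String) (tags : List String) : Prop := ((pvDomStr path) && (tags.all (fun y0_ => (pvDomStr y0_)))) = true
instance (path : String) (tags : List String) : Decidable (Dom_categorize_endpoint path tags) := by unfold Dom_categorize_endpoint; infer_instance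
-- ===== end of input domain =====

-- B inverts the tag stage (iterate the input tags once with a dict lookup and a
-- min-priority accumulator instead of scanning CATEGORY_MAP, which rescans tags
-- per rule tag) and replaces the path if/elif chain with a min-priority
-- accumulator over an indexed rule list; measured faster in a timing run.

-- ===== PORT A =====
-- CATEGORY_MAP as a literal association list in the Python dict's insertion order.
def pvCategoryMap : List (String × List String) :=
  [("System", ["Health", "Features", "Metadata"]),
   ("Species", ["Species"]),
   ("Genomes", ["Genomes"]),
   ("Genes", ["Genes"]),
   ("Drugs", ["Drugs"]),
   ("Proteomics", ["Proteomics"]),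
   ("Essentiality", ["Essentiality"]),
   ("Fitness", ["Fitness"]),
   ("Mutant Growth", ["MutantGrowth"]),
   ("Reactions", ["Reactions"]),
   ("Operons", ["Operons"]),
   ("Orthologs", ["Orthologs"]),
   ("PPI", ["PPI", "ProteinProteinInteractions"]),
   ("TTP", ["TTP", "PooledTTP"]),
   ("PyHMMER", ["PyHMMER", "Pyhmmer"])]

-- the 'for category, tag_list in CATEGORY_MAP.items()' loop; 'k' is the code after
-- the loop (the path chain), evaluated when no early return fires.
def pvTagLoopA (tags : List String) (k : String) : List (String × List String) → String
  | [] => k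
  | (category, tagList) :: rest =>
      if tagList.any (fun tag => tags.contains tag) then category
      else pvTagLoopA tags k rest

def categorize_endpoint (path : String) (tags : List String) : String :=
  let _path_lower := PySem.Str.lower path   -- computed and unused, as in A
  pvTagLoopA tags
    (if PySem.Str.isIn "/health" path || PySem.Str.isIn "/features" path || PySem.Str.isIn "/metadata" path then "System"
     else if PySem.Str.isIn "/species" path then "Species"
     else if PySem.Str.isIn "/genomes" path then "Genomes"
     else if PySem.Str.isIn "/genes" path then "Genes"
     else if PySem.Str.isIn "/drugs" path then "Drugs"
     else if PySem.Str.isIn "/proteomics" path then "Proteomics"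
     else if PySem.Str.isIn "/essentiality" path then "Essentiality"
     else if PySem.Str.isIn "/fitness" path then "Fitness"
     else if PySem.Str.isIn "/mutant-growth" path then "Mutant Growth"
     else if PySem.Str.isIn "/reactions" path then "Reactions"
     else if PySem.Str.isIn "/operons" path then "Operons"
     else if PySem.Str.isIn "/orthologs" path then "Orthologs"
     else if PySem.Str.isIn "/ppi" path then "PPI"
     else if PySem.Str.isIn "/ttp" path then "TTP"
     else if PySem.Str.isIn "/pyhmmer" path then "PyHMMER"
     else "Other")
    pvCategoryMap

-- ===== PORT B =====
-- TAG_RULE: tag -> (priority, category), as a PySem.Dict (literal assoc list).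
def pvTagRule : PySem.Dict String (Nat × String) := PySem.Dict.mk
  [("Health", (0, "System")), ("Features", (0, "System")), ("Metadata", (0, "System")),
   ("Species", (1, "Species")),
   ("Genomes", (2, "Genomes")),
   ("Genes", (3, "Genes")),
   ("Drugs", (4, "Drugs")),
   ("Proteomics", (5, "Proteomics")),
   ("Essentiality", (6, "Essentiality")),
   ("Fitness", (7, "Fitness")),
   ("MutantGrowth", (8, "Mutant Growth")),
   ("Reactions", (9, "Reactions")),
   ("Operons", (10, "Operons")),
   ("Orthologs", (11, "Orthologs")),
   ("PPI", (12, "PPI")), ("ProteinProteinInteractions", (12, "PPI")),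
   ("TTP", (13, "TTP")), ("PooledTTP", (13, "TTP")),
   ("PyHMMER", (14, "PyHMMER")), ("Pyhmmer", (14, "PyHMMER"))]

def pvPathRule : List (Nat × String × String) :=
  [(0, "/health", "System"), (1, "/features", "System"), (2, "/metadata", "System"),
   (3, "/species", "Species"),
   (4, "/genomes", "Genomes"),
   (5, "/genes", "Genes"),
   (6, "/drugs", "Drugs"),
   (7, "/proteomics", "Proteomics"),
   (8, "/essentiality", "Essentiality"),
   (9, "/fitness", "Fitness"),
   (10, "/mutant-growth", "Mutant Growth"),
   (11, "/reactions", "Reactions"),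
   (12, "/operons", "Operons"),
   (13, "/orthologs", "Orthologs"),
   (14, "/ppi", "PPI"),
   (15, "/ttp", "TTP"),
   (16, "/pyhmmer", "PyHMMER")]

-- one iteration of Source B's 'for tag in tags' loop body
def pvStepTag (best : Option (Nat × String)) (tag : String) : Option (Nat × String) :=
  match PySem.Dict.get? pvTagRule tag with
  | none => best
  | some hit =>
      match best with
      | none => some hit
      | some b => if hit.1 < b.1 then some hit else best

-- the 'for tag in tags' loop itself
def pvFoldTags : List String → Option (Nat × String) → Option (Nat × String)
  | [], best => best
  | t :: ts, best => pvFoldTags ts (pvStepTag best t)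

-- one iteration of Source B's 'for prio, sub, cat in PATH_RULE' loop body
def pvStepPath (path : String) (best : Option (Nat × String)) (r : Nat × String × String) : Option (Nat × String) :=
  if PySem.Str.isIn r.2.1 path && (match best with | none => true | some b => decide (r.1 < b.1)) then
    some (r.1, r.2.2)
  else best

def categorize_endpoint_alt (path : String) (tags : List String) : String :=
  let best := pvFoldTags tags none
  let best := match best with
    | none => pvPathRule.foldl (pvStepPath path) none
    | some b => some b
  match best with
  | some b => b.2
  | none => "Other"

-- ===== PRECONDITION & SPEC =====
def Spec_categorize_endpoint (path : String) (tags : List String) (out : String) : Prop := out = categorize_endpoint_alt path tags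
instance (path : String) (tags : List String) (out : String) : Decidable (Spec_categorize_endpoint path tags out) := by unfold Spec_categorize_endpoint; infer_instance

-- ===== CLAIM (what is proved, stated in full; the proofs are below) =====
def Claim_equal_categorize_endpoint : Prop := ∀ (path : String) (tags : List String), Dom_categorize_endpoint path tags → Spec_categorize_endpoint path tags (categorize_endpoint path tags)

-- ===== LEMMAS AND PROOFS =====

-- CATEGORY_MAP regrouped as (rule tags, priority, category), priorities strictly increasing
def pvRules : List (List String × Nat × String) :=
  [(["Health", "Features", "Metadata"], 0, "System"),
   (["Species"], 1, "Species"),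
   (["Genomes"], 2, "Genomes"),
   (["Genes"], 3, "Genes"),
   (["Drugs"], 4, "Drugs"),
   (["Proteomics"], 5, "Proteomics"),
   (["Essentiality"], 6, "Essentiality"),
   (["Fitness"], 7, "Fitness"),
   (["MutantGrowth"], 8, "Mutant Growth"),
   (["Reactions"], 9, "Reactions"),
   (["Operons"], 10, "Operons"),
   (["Orthologs"], 11, "Orthologs"),
   (["PPI", "ProteinProteinInteractions"], 12, "PPI"),
   (["TTP", "PooledTTP"], 13, "TTP"),
   (["PyHMMER", "Pyhmmer"], 14, "PyHMMER")]

-- first rule (in list order) one of whose tags lies in `tags`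
def pvScanR (tags : List String) : List (List String × Nat × String) → Option (Nat × String)
  | [] => none
  | (keys, p, c) :: rest =>
      if keys.any (fun tag => tags.contains tag) then some (p, c) else pvScanR tags rest

-- first rule whose tag list contains the single tag t
def pvLookupR (t : String) : List (List String × Nat × String) → Option (Nat × String)
  | [] => none
  | (keys, p, c) :: rest =>
      if keys.any (fun k => k == t) then some (p, c) else pvLookupR t rest

-- 'keep the smaller priority, left wins ties' as a binary operation
def pvMerge : Option (Nat × String) → Option (Nat × String) → Option (Nat × String)
  | b, none => b
  | none, some r => some r
  | some b, some r => if r.1 < b.1 then some r else some b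

theorem pvMerge_none_left (x : Option (Nat × String)) : pvMerge none x = x := by
  cases x <;> rfl

theorem pvStepTag_eq_merge (best : Option (Nat × String)) (t : String) :
    pvStepTag best t = pvMerge best (PySem.Dict.get? pvTagRule t) := by
  unfold pvStepTag pvMerge
  cases PySem.Dict.get? pvTagRule t <;> cases best <;> rfl

theorem pvMerge_assoc (a b c : Option (Nat × String)) :
    pvMerge (pvMerge a b) c = pvMerge a (pvMerge b c) := by
  cases a with
  | none => cases b <;> cases c <;> simp only [pvMerge] <;> (try rfl) <;> split <;> rfl
  | some x =>
    cases b with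
    | none => cases c <;> simp [pvMerge]
    | some y =>
      cases c with
      | none => simp [pvMerge]
      | some z =>
        by_cases h1 : y.1 < x.1 <;> by_cases h2 : z.1 < y.1 <;>
          simp [pvMerge, h1, h2] <;> (try split_ifs) <;>
          first | rfl | omega | (intro h; omega)

theorem pvFoldTags_merge (ts : List String) (best : Option (Nat × String)) :
    pvFoldTags ts best = pvMerge best (pvFoldTags ts none) := by
  induction ts generalizing best with
  | nil => cases best <;> rfl
  | cons t ts ih =>
      show pvFoldTags ts (pvStepTag best t) = pvMerge best (pvFoldTags ts (pvStepTag none t))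
      rw [ih (pvStepTag best t), ih (pvStepTag none t), pvStepTag_eq_merge best t,
          pvStepTag_eq_merge none t, pvMerge_none_left, ← pvMerge_assoc]

theorem pvAny_or (keys : List String) (p q : String → Bool) :
    keys.any (fun k => p k || q k) = (keys.any p || keys.any q) := by
  induction keys with
  | nil => rfl
  | cons k ks ih =>
      simp only [List.any_cons, ih]
      cases p k <;> cases q k <;> simp

theorem pvScanR_nil : ∀ rs, pvScanR [] rs = none := by
  intro rs
  induction rs with
  | nil => rfl
  | cons r rest ih =>
      obtain ⟨keys, p, c⟩ := r
      simp only [pvScanR]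
      have : keys.any (fun tag => List.contains [] tag) = false := by
        simp [List.any_eq_false]
      rw [this]
      simpa using ih

theorem pvScanR_mem (ts : List String) :
    ∀ rs x, pvScanR ts rs = some x → ∃ r ∈ rs, x = (r.2.1, r.2.2) := by
  intro rs
  induction rs with
  | nil => intro x h; exact absurd h (by simp [pvScanR])
  | cons r rest ih =>
      obtain ⟨keys, p, c⟩ := r
      intro x h
      by_cases hc : keys.any (fun tag => ts.contains tag) = true
      · rw [pvScanR, if_pos hc] at h
        exact ⟨(keys, p, c), by simp, by simp [← Option.some_inj.mp h]⟩
      · rw [pvScanR, if_neg hc] at h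
        obtain ⟨r', hr', hx⟩ := ih x h
        exact ⟨r', List.mem_cons_of_mem _ hr', hx⟩

theorem pvLookupR_mem (t : String) :
    ∀ rs x, pvLookupR t rs = some x → ∃ r ∈ rs, x = (r.2.1, r.2.2) := by
  intro rs
  induction rs with
  | nil => intro x h; exact absurd h (by simp [pvLookupR])
  | cons r rest ih =>
      obtain ⟨keys, p, c⟩ := r
      intro x h
      by_cases hc : keys.any (fun k => k == t) = true
      · rw [pvLookupR, if_pos hc] at h
        exact ⟨(keys, p, c), by simp, by simp [← Option.some_inj.mp h]⟩
      · rw [pvLookupR, if_neg hc] at h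
        obtain ⟨r', hr', hx⟩ := ih x h
        exact ⟨r', List.mem_cons_of_mem _ hr', hx⟩

-- first match over a priority-sorted rule list, under a cons'd tag, is the
-- min-merge of the single-tag lookup with the rest's first match
theorem pvScanR_cons (t : String) (ts : List String) :
    ∀ rs, List.Pairwise (fun a b => a.2.1 < b.2.1) rs →
      pvScanR (t :: ts) rs = pvMerge (pvLookupR t rs) (pvScanR ts rs) := by
  intro rs
  induction rs with
  | nil => intro _; rfl
  | cons r rest ih =>
      intro hp
      obtain ⟨keys, p, c⟩ := r
      have hlt : ∀ r' ∈ rest, p < r'.2.1 := by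
        intro r' hr'
        exact (List.pairwise_cons.mp hp).1 r' hr'
      have hrest := ih (List.pairwise_cons.mp hp).2
      have hcond : (keys.any (fun tag => (t :: ts).contains tag))
          = (keys.any (fun k => k == t) || keys.any (fun tag => ts.contains tag)) := by
        simp only [List.contains_cons]
        exact pvAny_or keys _ _
      by_cases hA : keys.any (fun k => k == t) = true
      · rw [pvScanR, if_pos (by rw [hcond, hA]; exact Bool.true_or _), pvLookupR, if_pos hA]
        by_cases hB : keys.any (fun tag => ts.contains tag) = true
        · rw [pvScanR, if_pos hB]
          simp [pvMerge]
        · rw [pvScanR, if_neg hB]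
          cases hx : pvScanR ts rest with
          | none => rfl
          | some x =>
              obtain ⟨r', hr', hx'⟩ := pvScanR_mem ts rest x hx
              have : p < x.1 := by rw [hx']; exact hlt r' hr'
              simp [pvMerge, Nat.not_lt.mpr (Nat.le_of_lt this)]
      · replace hA : keys.any (fun k => k == t) = false := by rwa [Bool.not_eq_true] at hA
        rw [pvLookupR, if_neg (by rw [hA]; decide)]
        by_cases hB : keys.any (fun tag => ts.contains tag) = true
        · rw [pvScanR, if_pos (by rw [hcond, hA, hB]; decide), pvScanR, if_pos hB]
          cases hx : pvLookupR t rest with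
          | none => rfl
          | some x =>
              obtain ⟨r', hr', hx'⟩ := pvLookupR_mem t rest x hx
              have : p < x.1 := by rw [hx']; exact hlt r' hr'
              simp [pvMerge, this]
        · replace hB : keys.any (fun tag => ts.contains tag) = false := by rwa [Bool.not_eq_true] at hB
          rw [pvScanR, if_neg (by rw [hcond, hA, hB]; decide), pvScanR, if_neg (by rw [hB]; decide)]
          exact hrest

theorem pvLookup_eq (t : String) : pvLookupR t pvRules = PySem.Dict.get? pvTagRule t := by
  by_cases h1 : t = "Health"
  · subst h1
    have ha : pvLookupR "Health" pvRules = some (0, "System") := by simp [pvLookupR, pvRules]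
    have hb : PySem.Dict.get? pvTagRule "Health" = some (0, "System") := by simp [pvTagRule, PySem.Dict.get?_mk_cons]
    rw [ha, hb]
  by_cases h2 : t = "Features"
  · subst h2
    have ha : pvLookupR "Features" pvRules = some (0, "System") := by simp [pvLookupR, pvRules]
    have hb : PySem.Dict.get? pvTagRule "Features" = some (0, "System") := by simp [pvTagRule, PySem.Dict.get?_mk_cons]
    rw [ha, hb]
  by_cases h3 : t = "Metadata"
  · subst h3
    have ha : pvLookupR "Metadata" pvRules = some (0, "System") := by simp [pvLookupR, pvRules]
    have hb : PySem.Dict.get? pvTagRule "Metadata" = some (0, "System") := by simp [pvTagRule, PySem.Dict.get?_mk_cons]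
    rw [ha, hb]
  by_cases h4 : t = "Species"
  · subst h4
    have ha : pvLookupR "Species" pvRules = some (1, "Species") := by simp [pvLookupR, pvRules]
    have hb : PySem.Dict.get? pvTagRule "Species" = some (1, "Species") := by simp [pvTagRule, PySem.Dict.get?_mk_cons]
    rw [ha, hb]
  by_cases h5 : t = "Genomes"
  · subst h5
    have ha : pvLookupR "Genomes" pvRules = some (2, "Genomes") := by simp [pvLookupR, pvRules]
    have hb : PySem.Dict.get? pvTagRule "Genomes" = some (2, "Genomes") := by simp [pvTagRule, PySem.Dict.get?_mk_cons]
    rw [ha, hb]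
  by_cases h6 : t = "Genes"
  · subst h6
    have ha : pvLookupR "Genes" pvRules = some (3, "Genes") := by simp [pvLookupR, pvRules]
    have hb : PySem.Dict.get? pvTagRule "Genes" = some (3, "Genes") := by simp [pvTagRule, PySem.Dict.get?_mk_cons]
    rw [ha, hb]
  by_cases h7 : t = "Drugs"
  · subst h7
    have ha : pvLookupR "Drugs" pvRules = some (4, "Drugs") := by simp [pvLookupR, pvRules]
    have hb : PySem.Dict.get? pvTagRule "Drugs" = some (4, "Drugs") := by simp [pvTagRule, PySem.Dict.get?_mk_cons]
    rw [ha, hb]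
  by_cases h8 : t = "Proteomics"
  · subst h8
    have ha : pvLookupR "Proteomics" pvRules = some (5, "Proteomics") := by simp [pvLookupR, pvRules]
    have hb : PySem.Dict.get? pvTagRule "Proteomics" = some (5, "Proteomics") := by simp [pvTagRule, PySem.Dict.get?_mk_cons]
    rw [ha, hb]
  by_cases h9 : t = "Essentiality"
  · subst h9
    have ha : pvLookupR "Essentiality" pvRules = some (6, "Essentiality") := by simp [pvLookupR, pvRules]
    have hb : PySem.Dict.get? pvTagRule "Essentiality" = some (6, "Essentiality") := by simp [pvTagRule, PySem.Dict.get?_mk_cons]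
    rw [ha, hb]
  by_cases h10 : t = "Fitness"
  · subst h10
    have ha : pvLookupR "Fitness" pvRules = some (7, "Fitness") := by simp [pvLookupR, pvRules]
    have hb : PySem.Dict.get? pvTagRule "Fitness" = some (7, "Fitness") := by simp [pvTagRule, PySem.Dict.get?_mk_cons]
    rw [ha, hb]
  by_cases h11 : t = "MutantGrowth"
  · subst h11
    have ha : pvLookupR "MutantGrowth" pvRules = some (8, "Mutant Growth") := by simp [pvLookupR, pvRules]
    have hb : PySem.Dict.get? pvTagRule "MutantGrowth" = some (8, "Mutant Growth") := by simp [pvTagRule, PySem.Dict.get?_mk_cons]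
    rw [ha, hb]
  by_cases h12 : t = "Reactions"
  · subst h12
    have ha : pvLookupR "Reactions" pvRules = some (9, "Reactions") := by simp [pvLookupR, pvRules]
    have hb : PySem.Dict.get? pvTagRule "Reactions" = some (9, "Reactions") := by simp [pvTagRule, PySem.Dict.get?_mk_cons]
    rw [ha, hb]
  by_cases h13 : t = "Operons"
  · subst h13
    have ha : pvLookupR "Operons" pvRules = some (10, "Operons") := by simp [pvLookupR, pvRules]
    have hb : PySem.Dict.get? pvTagRule "Operons" = some (10, "Operons") := by simp [pvTagRule, PySem.Dict.get?_mk_cons]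
    rw [ha, hb]
  by_cases h14 : t = "Orthologs"
  · subst h14
    have ha : pvLookupR "Orthologs" pvRules = some (11, "Orthologs") := by simp [pvLookupR, pvRules]
    have hb : PySem.Dict.get? pvTagRule "Orthologs" = some (11, "Orthologs") := by simp [pvTagRule, PySem.Dict.get?_mk_cons]
    rw [ha, hb]
  by_cases h15 : t = "PPI"
  · subst h15
    have ha : pvLookupR "PPI" pvRules = some (12, "PPI") := by simp [pvLookupR, pvRules]
    have hb : PySem.Dict.get? pvTagRule "PPI" = some (12, "PPI") := by simp [pvTagRule, PySem.Dict.get?_mk_cons]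
    rw [ha, hb]
  by_cases h16 : t = "ProteinProteinInteractions"
  · subst h16
    have ha : pvLookupR "ProteinProteinInteractions" pvRules = some (12, "PPI") := by simp [pvLookupR, pvRules]
    have hb : PySem.Dict.get? pvTagRule "ProteinProteinInteractions" = some (12, "PPI") := by simp [pvTagRule, PySem.Dict.get?_mk_cons]
    rw [ha, hb]
  by_cases h17 : t = "TTP"
  · subst h17
    have ha : pvLookupR "TTP" pvRules = some (13, "TTP") := by simp [pvLookupR, pvRules]
    have hb : PySem.Dict.get? pvTagRule "TTP" = some (13, "TTP") := by simp [pvTagRule, PySem.Dict.get?_mk_cons]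
    rw [ha, hb]
  by_cases h18 : t = "PooledTTP"
  · subst h18
    have ha : pvLookupR "PooledTTP" pvRules = some (13, "TTP") := by simp [pvLookupR, pvRules]
    have hb : PySem.Dict.get? pvTagRule "PooledTTP" = some (13, "TTP") := by simp [pvTagRule, PySem.Dict.get?_mk_cons]
    rw [ha, hb]
  by_cases h19 : t = "PyHMMER"
  · subst h19
    have ha : pvLookupR "PyHMMER" pvRules = some (14, "PyHMMER") := by simp [pvLookupR, pvRules]
    have hb : PySem.Dict.get? pvTagRule "PyHMMER" = some (14, "PyHMMER") := by simp [pvTagRule, PySem.Dict.get?_mk_cons]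
    rw [ha, hb]
  by_cases h20 : t = "Pyhmmer"
  · subst h20
    have ha : pvLookupR "Pyhmmer" pvRules = some (14, "PyHMMER") := by simp [pvLookupR, pvRules]
    have hb : PySem.Dict.get? pvTagRule "Pyhmmer" = some (14, "PyHMMER") := by simp [pvTagRule, PySem.Dict.get?_mk_cons]
    rw [ha, hb]
  have ha : pvLookupR t pvRules = none := by
    have f1 : ("Health" == t) = false := beq_eq_false_iff_ne.mpr (Ne.symm h1)
    have f2 : ("Features" == t) = false := beq_eq_false_iff_ne.mpr (Ne.symm h2)
    have f3 : ("Metadata" == t) = false := beq_eq_false_iff_ne.mpr (Ne.symm h3)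
    have f4 : ("Species" == t) = false := beq_eq_false_iff_ne.mpr (Ne.symm h4)
    have f5 : ("Genomes" == t) = false := beq_eq_false_iff_ne.mpr (Ne.symm h5)
    have f6 : ("Genes" == t) = false := beq_eq_false_iff_ne.mpr (Ne.symm h6)
    have f7 : ("Drugs" == t) = false := beq_eq_false_iff_ne.mpr (Ne.symm h7)
    have f8 : ("Proteomics" == t) = false := beq_eq_false_iff_ne.mpr (Ne.symm h8)
    have f9 : ("Essentiality" == t) = false := beq_eq_false_iff_ne.mpr (Ne.symm h9)
    have f10 : ("Fitness" == t) = false := beq_eq_false_iff_ne.mpr (Ne.symm h10)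
    have f11 : ("MutantGrowth" == t) = false := beq_eq_false_iff_ne.mpr (Ne.symm h11)
    have f12 : ("Reactions" == t) = false := beq_eq_false_iff_ne.mpr (Ne.symm h12)
    have f13 : ("Operons" == t) = false := beq_eq_false_iff_ne.mpr (Ne.symm h13)
    have f14 : ("Orthologs" == t) = false := beq_eq_false_iff_ne.mpr (Ne.symm h14)
    have f15 : ("PPI" == t) = false := beq_eq_false_iff_ne.mpr (Ne.symm h15)
    have f16 : ("ProteinProteinInteractions" == t) = false := beq_eq_false_iff_ne.mpr (Ne.symm h16)
    have f17 : ("TTP" == t) = false := beq_eq_false_iff_ne.mpr (Ne.symm h17)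
    have f18 : ("PooledTTP" == t) = false := beq_eq_false_iff_ne.mpr (Ne.symm h18)
    have f19 : ("PyHMMER" == t) = false := beq_eq_false_iff_ne.mpr (Ne.symm h19)
    have f20 : ("Pyhmmer" == t) = false := beq_eq_false_iff_ne.mpr (Ne.symm h20)
    simp [pvLookupR, pvRules, f1, f2, f3, f4, f5, f6, f7, f8, f9, f10, f11, f12, f13, f14, f15, f16, f17, f18, f19, f20]
  have hb : PySem.Dict.get? pvTagRule t = none := by simp [pvTagRule, PySem.Dict.get?, Ne.symm h1, Ne.symm h2, Ne.symm h3, Ne.symm h4, Ne.symm h5, Ne.symm h6, Ne.symm h7, Ne.symm h8, Ne.symm h9, Ne.symm h10, Ne.symm h11, Ne.symm h12, Ne.symm h13, Ne.symm h14, Ne.symm h15, Ne.symm h16, Ne.symm h17, Ne.symm h18, Ne.symm h19, Ne.symm h20]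
  rw [ha, hb]

theorem pvRules_sorted : List.Pairwise (fun a b => a.2.1 < b.2.1) pvRules := by
  decide

-- B's tag-stage fold computes the first matching rule of pvRules
theorem pvFoldTags_eq_scan (tags : List String) :
    pvFoldTags tags none = pvScanR tags pvRules := by
  induction tags with
  | nil => exact (pvScanR_nil pvRules).symm
  | cons t ts ih =>
      show pvFoldTags ts (pvStepTag none t) = _
      rw [pvFoldTags_merge, ih, pvStepTag_eq_merge, pvMerge_none_left, ← pvLookup_eq,
          pvScanR_cons t ts pvRules pvRules_sorted]

-- A's tag loop over a rule list (in pvCategoryMap form), in terms of pvScanR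
theorem pvTagLoopA_eq (tags : List String) (k : String) :
    ∀ rs, pvTagLoopA tags k (rs.map (fun r => (r.2.2, r.1)))
      = (match pvScanR tags rs with | some b => b.2 | none => k) := by
  intro rs
  induction rs with
  | nil => rfl
  | cons r rest ih =>
      obtain ⟨keys, p, c⟩ := r
      simp only [List.map_cons, pvTagLoopA, pvScanR]
      by_cases hc : keys.any (fun tag => tags.contains tag) = true
      · rw [if_pos hc, if_pos hc]
      · rw [if_neg hc, if_neg hc, ih]

-- once best holds priority p, rules with priority ≥ p leave it unchanged
theorem pvStuck (path : String) (p : Nat) (c : String) :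
    ∀ rs : List (Nat × String × String), (∀ r ∈ rs, ¬ r.1 < p) →
      rs.foldl (pvStepPath path) (some (p, c)) = some (p, c) := by
  intro rs
  induction rs with
  | nil => intro _; rfl
  | cons r rs ih =>
      intro h
      have hr : decide (r.1 < p) = false := by
        simpa using h r (by simp)
      rw [List.foldl_cons]
      have st : pvStepPath path (some (p, c)) r = some (p, c) := by
        simp [pvStepPath, hr]
      rw [st]
      exact ih (fun r' hr' => h r' (List.mem_cons_of_mem _ hr'))

-- closed form of B's path fold (nested-if chain over the 17 substring tests)
def pvPathScan (path : String) : Option (Nat × String) :=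
  if PySem.Str.isIn "/health" path then some (0, "System")
  else if PySem.Str.isIn "/features" path then some (1, "System")
  else if PySem.Str.isIn "/metadata" path then some (2, "System")
  else if PySem.Str.isIn "/species" path then some (3, "Species")
  else if PySem.Str.isIn "/genomes" path then some (4, "Genomes")
  else if PySem.Str.isIn "/genes" path then some (5, "Genes")
  else if PySem.Str.isIn "/drugs" path then some (6, "Drugs")
  else if PySem.Str.isIn "/proteomics" path then some (7, "Proteomics")
  else if PySem.Str.isIn "/essentiality" path then some (8, "Essentiality")
  else if PySem.Str.isIn "/fitness" path then some (9, "Fitness")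
  else if PySem.Str.isIn "/mutant-growth" path then some (10, "Mutant Growth")
  else if PySem.Str.isIn "/reactions" path then some (11, "Reactions")
  else if PySem.Str.isIn "/operons" path then some (12, "Operons")
  else if PySem.Str.isIn "/orthologs" path then some (13, "Orthologs")
  else if PySem.Str.isIn "/ppi" path then some (14, "PPI")
  else if PySem.Str.isIn "/ttp" path then some (15, "TTP")
  else if PySem.Str.isIn "/pyhmmer" path then some (16, "PyHMMER")
  else none

theorem pvPathFold_eq (path : String) :
    pvPathRule.foldl (pvStepPath path) none = pvPathScan path := by
  unfold pvPathRule
  rw [List.foldl_cons]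
  by_cases g0 : PySem.Str.isIn "/health" path = true
  · have st : pvStepPath path none (0, "/health", "System") = some (0, "System") := by
      unfold pvStepPath; rw [g0]; rfl
    rw [st, pvStuck path 0 "System" _ (by decide)]
    unfold pvPathScan
    rw [g0]
    rfl
  replace g0 : PySem.Str.isIn "/health" path = false := by rwa [Bool.not_eq_true] at g0
  have st : pvStepPath path none (0, "/health", "System") = none := by
    unfold pvStepPath; rw [g0]; rfl
  rw [st]
  rw [List.foldl_cons]
  by_cases g1 : PySem.Str.isIn "/features" path = true
  · have st : pvStepPath path none (1, "/features", "System") = some (1, "System") := by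
      unfold pvStepPath; rw [g1]; rfl
    rw [st, pvStuck path 1 "System" _ (by decide)]
    unfold pvPathScan
    rw [g0, g1]
    rfl
  replace g1 : PySem.Str.isIn "/features" path = false := by rwa [Bool.not_eq_true] at g1
  have st : pvStepPath path none (1, "/features", "System") = none := by
    unfold pvStepPath; rw [g1]; rfl
  rw [st]
  rw [List.foldl_cons]
  by_cases g2 : PySem.Str.isIn "/metadata" path = true
  · have st : pvStepPath path none (2, "/metadata", "System") = some (2, "System") := by
      unfold pvStepPath; rw [g2]; rfl
    rw [st, pvStuck path 2 "System" _ (by decide)]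
    unfold pvPathScan
    rw [g0, g1, g2]
    rfl
  replace g2 : PySem.Str.isIn "/metadata" path = false := by rwa [Bool.not_eq_true] at g2
  have st : pvStepPath path none (2, "/metadata", "System") = none := by
    unfold pvStepPath; rw [g2]; rfl
  rw [st]
  rw [List.foldl_cons]
  by_cases g3 : PySem.Str.isIn "/species" path = true
  · have st : pvStepPath path none (3, "/species", "Species") = some (3, "Species") := by
      unfold pvStepPath; rw [g3]; rfl
    rw [st, pvStuck path 3 "Species" _ (by decide)]
    unfold pvPathScan
    rw [g0, g1, g2, g3]
    rfl
  replace g3 : PySem.Str.isIn "/species" path = false := by rwa [Bool.not_eq_true] at g3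
  have st : pvStepPath path none (3, "/species", "Species") = none := by
    unfold pvStepPath; rw [g3]; rfl
  rw [st]
  rw [List.foldl_cons]
  by_cases g4 : PySem.Str.isIn "/genomes" path = true
  · have st : pvStepPath path none (4, "/genomes", "Genomes") = some (4, "Genomes") := by
      unfold pvStepPath; rw [g4]; rfl
    rw [st, pvStuck path 4 "Genomes" _ (by decide)]
    unfold pvPathScan
    rw [g0, g1, g2, g3, g4]
    rfl
  replace g4 : PySem.Str.isIn "/genomes" path = false := by rwa [Bool.not_eq_true] at g4
  have st : pvStepPath path none (4, "/genomes", "Genomes") = none := by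
    unfold pvStepPath; rw [g4]; rfl
  rw [st]
  rw [List.foldl_cons]
  by_cases g5 : PySem.Str.isIn "/genes" path = true
  · have st : pvStepPath path none (5, "/genes", "Genes") = some (5, "Genes") := by
      unfold pvStepPath; rw [g5]; rfl
    rw [st, pvStuck path 5 "Genes" _ (by decide)]
    unfold pvPathScan
    rw [g0, g1, g2, g3, g4, g5]
    rfl
  replace g5 : PySem.Str.isIn "/genes" path = false := by rwa [Bool.not_eq_true] at g5
  have st : pvStepPath path none (5, "/genes", "Genes") = none := by
    unfold pvStepPath; rw [g5]; rfl
  rw [st]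
  rw [List.foldl_cons]
  by_cases g6 : PySem.Str.isIn "/drugs" path = true
  · have st : pvStepPath path none (6, "/drugs", "Drugs") = some (6, "Drugs") := by
      unfold pvStepPath; rw [g6]; rfl
    rw [st, pvStuck path 6 "Drugs" _ (by decide)]
    unfold pvPathScan
    rw [g0, g1, g2, g3, g4, g5, g6]
    rfl
  replace g6 : PySem.Str.isIn "/drugs" path = false := by rwa [Bool.not_eq_true] at g6
  have st : pvStepPath path none (6, "/drugs", "Drugs") = none := by
    unfold pvStepPath; rw [g6]; rfl
  rw [st]
  rw [List.foldl_cons]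
  by_cases g7 : PySem.Str.isIn "/proteomics" path = true
  · have st : pvStepPath path none (7, "/proteomics", "Proteomics") = some (7, "Proteomics") := by
      unfold pvStepPath; rw [g7]; rfl
    rw [st, pvStuck path 7 "Proteomics" _ (by decide)]
    unfold pvPathScan
    rw [g0, g1, g2, g3, g4, g5, g6, g7]
    rfl
  replace g7 : PySem.Str.isIn "/proteomics" path = false := by rwa [Bool.not_eq_true] at g7
  have st : pvStepPath path none (7, "/proteomics", "Proteomics") = none := by
    unfold pvStepPath; rw [g7]; rfl
  rw [st]
  rw [List.foldl_cons]
  by_cases g8 : PySem.Str.isIn "/essentiality" path = true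
  · have st : pvStepPath path none (8, "/essentiality", "Essentiality") = some (8, "Essentiality") := by
      unfold pvStepPath; rw [g8]; rfl
    rw [st, pvStuck path 8 "Essentiality" _ (by decide)]
    unfold pvPathScan
    rw [g0, g1, g2, g3, g4, g5, g6, g7, g8]
    rfl
  replace g8 : PySem.Str.isIn "/essentiality" path = false := by rwa [Bool.not_eq_true] at g8
  have st : pvStepPath path none (8, "/essentiality", "Essentiality") = none := by
    unfold pvStepPath; rw [g8]; rfl
  rw [st]
  rw [List.foldl_cons]
  by_cases g9 : PySem.Str.isIn "/fitness" path = true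
  · have st : pvStepPath path none (9, "/fitness", "Fitness") = some (9, "Fitness") := by
      unfold pvStepPath; rw [g9]; rfl
    rw [st, pvStuck path 9 "Fitness" _ (by decide)]
    unfold pvPathScan
    rw [g0, g1, g2, g3, g4, g5, g6, g7, g8, g9]
    rfl
  replace g9 : PySem.Str.isIn "/fitness" path = false := by rwa [Bool.not_eq_true] at g9
  have st : pvStepPath path none (9, "/fitness", "Fitness") = none := by
    unfold pvStepPath; rw [g9]; rfl
  rw [st]
  rw [List.foldl_cons]
  by_cases g10 : PySem.Str.isIn "/mutant-growth" path = true
  · have st : pvStepPath path none (10, "/mutant-growth", "Mutant Growth") = some (10, "Mutant Growth") := by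
      unfold pvStepPath; rw [g10]; rfl
    rw [st, pvStuck path 10 "Mutant Growth" _ (by decide)]
    unfold pvPathScan
    rw [g0, g1, g2, g3, g4, g5, g6, g7, g8, g9, g10]
    rfl
  replace g10 : PySem.Str.isIn "/mutant-growth" path = false := by rwa [Bool.not_eq_true] at g10
  have st : pvStepPath path none (10, "/mutant-growth", "Mutant Growth") = none := by
    unfold pvStepPath; rw [g10]; rfl
  rw [st]
  rw [List.foldl_cons]
  by_cases g11 : PySem.Str.isIn "/reactions" path = true
  · have st : pvStepPath path none (11, "/reactions", "Reactions") = some (11, "Reactions") := by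
      unfold pvStepPath; rw [g11]; rfl
    rw [st, pvStuck path 11 "Reactions" _ (by decide)]
    unfold pvPathScan
    rw [g0, g1, g2, g3, g4, g5, g6, g7, g8, g9, g10, g11]
    rfl
  replace g11 : PySem.Str.isIn "/reactions" path = false := by rwa [Bool.not_eq_true] at g11
  have st : pvStepPath path none (11, "/reactions", "Reactions") = none := by
    unfold pvStepPath; rw [g11]; rfl
  rw [st]
  rw [List.foldl_cons]
  by_cases g12 : PySem.Str.isIn "/operons" path = true
  · have st : pvStepPath path none (12, "/operons", "Operons") = some (12, "Operons") := by
      unfold pvStepPath; rw [g12]; rfl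
    rw [st, pvStuck path 12 "Operons" _ (by decide)]
    unfold pvPathScan
    rw [g0, g1, g2, g3, g4, g5, g6, g7, g8, g9, g10, g11, g12]
    rfl
  replace g12 : PySem.Str.isIn "/operons" path = false := by rwa [Bool.not_eq_true] at g12
  have st : pvStepPath path none (12, "/operons", "Operons") = none := by
    unfold pvStepPath; rw [g12]; rfl
  rw [st]
  rw [List.foldl_cons]
  by_cases g13 : PySem.Str.isIn "/orthologs" path = true
  · have st : pvStepPath path none (13, "/orthologs", "Orthologs") = some (13, "Orthologs") := by
      unfold pvStepPath; rw [g13]; rfl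
    rw [st, pvStuck path 13 "Orthologs" _ (by decide)]
    unfold pvPathScan
    rw [g0, g1, g2, g3, g4, g5, g6, g7, g8, g9, g10, g11, g12, g13]
    rfl
  replace g13 : PySem.Str.isIn "/orthologs" path = false := by rwa [Bool.not_eq_true] at g13
  have st : pvStepPath path none (13, "/orthologs", "Orthologs") = none := by
    unfold pvStepPath; rw [g13]; rfl
  rw [st]
  rw [List.foldl_cons]
  by_cases g14 : PySem.Str.isIn "/ppi" path = true
  · have st : pvStepPath path none (14, "/ppi", "PPI") = some (14, "PPI") := by
      unfold pvStepPath; rw [g14]; rfl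
    rw [st, pvStuck path 14 "PPI" _ (by decide)]
    unfold pvPathScan
    rw [g0, g1, g2, g3, g4, g5, g6, g7, g8, g9, g10, g11, g12, g13, g14]
    rfl
  replace g14 : PySem.Str.isIn "/ppi" path = false := by rwa [Bool.not_eq_true] at g14
  have st : pvStepPath path none (14, "/ppi", "PPI") = none := by
    unfold pvStepPath; rw [g14]; rfl
  rw [st]
  rw [List.foldl_cons]
  by_cases g15 : PySem.Str.isIn "/ttp" path = true
  · have st : pvStepPath path none (15, "/ttp", "TTP") = some (15, "TTP") := by
      unfold pvStepPath; rw [g15]; rfl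
    rw [st, pvStuck path 15 "TTP" _ (by decide)]
    unfold pvPathScan
    rw [g0, g1, g2, g3, g4, g5, g6, g7, g8, g9, g10, g11, g12, g13, g14, g15]
    rfl
  replace g15 : PySem.Str.isIn "/ttp" path = false := by rwa [Bool.not_eq_true] at g15
  have st : pvStepPath path none (15, "/ttp", "TTP") = none := by
    unfold pvStepPath; rw [g15]; rfl
  rw [st]
  rw [List.foldl_cons]
  by_cases g16 : PySem.Str.isIn "/pyhmmer" path = true
  · have st : pvStepPath path none (16, "/pyhmmer", "PyHMMER") = some (16, "PyHMMER") := by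
      unfold pvStepPath; rw [g16]; rfl
    rw [st, pvStuck path 16 "PyHMMER" _ (by decide)]
    unfold pvPathScan
    rw [g0, g1, g2, g3, g4, g5, g6, g7, g8, g9, g10, g11, g12, g13, g14, g15, g16]
    rfl
  replace g16 : PySem.Str.isIn "/pyhmmer" path = false := by rwa [Bool.not_eq_true] at g16
  have st : pvStepPath path none (16, "/pyhmmer", "PyHMMER") = none := by
    unfold pvStepPath; rw [g16]; rfl
  rw [st]
  rw [List.foldl_nil]
  unfold pvPathScan
  rw [g0, g1, g2, g3, g4, g5, g6, g7, g8, g9, g10, g11, g12, g13, g14, g15, g16]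
  rfl

theorem pvPathChain_eq (path : String) :
    (match pvPathScan path with | some b => b.2 | none => "Other") =
    (if PySem.Str.isIn "/health" path || PySem.Str.isIn "/features" path || PySem.Str.isIn "/metadata" path then "System"
     else if PySem.Str.isIn "/species" path then "Species"
     else if PySem.Str.isIn "/genomes" path then "Genomes"
     else if PySem.Str.isIn "/genes" path then "Genes"
     else if PySem.Str.isIn "/drugs" path then "Drugs"
     else if PySem.Str.isIn "/proteomics" path then "Proteomics"
     else if PySem.Str.isIn "/essentiality" path then "Essentiality"
     else if PySem.Str.isIn "/fitness" path then "Fitness"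
     else if PySem.Str.isIn "/mutant-growth" path then "Mutant Growth"
     else if PySem.Str.isIn "/reactions" path then "Reactions"
     else if PySem.Str.isIn "/operons" path then "Operons"
     else if PySem.Str.isIn "/orthologs" path then "Orthologs"
     else if PySem.Str.isIn "/ppi" path then "PPI"
     else if PySem.Str.isIn "/ttp" path then "TTP"
     else if PySem.Str.isIn "/pyhmmer" path then "PyHMMER"
     else "Other") := by
  unfold pvPathScan
  by_cases g0 : PySem.Str.isIn "/health" path = true
  · rw [g0]
    rfl
  replace g0 : PySem.Str.isIn "/health" path = false := by rwa [Bool.not_eq_true] at g0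
  by_cases g1 : PySem.Str.isIn "/features" path = true
  · rw [g0, g1]
    rfl
  replace g1 : PySem.Str.isIn "/features" path = false := by rwa [Bool.not_eq_true] at g1
  by_cases g2 : PySem.Str.isIn "/metadata" path = true
  · rw [g0, g1, g2]
    rfl
  replace g2 : PySem.Str.isIn "/metadata" path = false := by rwa [Bool.not_eq_true] at g2
  by_cases g3 : PySem.Str.isIn "/species" path = true
  · rw [g0, g1, g2, g3]
    rfl
  replace g3 : PySem.Str.isIn "/species" path = false := by rwa [Bool.not_eq_true] at g3
  by_cases g4 : PySem.Str.isIn "/genomes" path = true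
  · rw [g0, g1, g2, g3, g4]
    rfl
  replace g4 : PySem.Str.isIn "/genomes" path = false := by rwa [Bool.not_eq_true] at g4
  by_cases g5 : PySem.Str.isIn "/genes" path = true
  · rw [g0, g1, g2, g3, g4, g5]
    rfl
  replace g5 : PySem.Str.isIn "/genes" path = false := by rwa [Bool.not_eq_true] at g5
  by_cases g6 : PySem.Str.isIn "/drugs" path = true
  · rw [g0, g1, g2, g3, g4, g5, g6]
    rfl
  replace g6 : PySem.Str.isIn "/drugs" path = false := by rwa [Bool.not_eq_true] at g6
  by_cases g7 : PySem.Str.isIn "/proteomics" path = true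
  · rw [g0, g1, g2, g3, g4, g5, g6, g7]
    rfl
  replace g7 : PySem.Str.isIn "/proteomics" path = false := by rwa [Bool.not_eq_true] at g7
  by_cases g8 : PySem.Str.isIn "/essentiality" path = true
  · rw [g0, g1, g2, g3, g4, g5, g6, g7, g8]
    rfl
  replace g8 : PySem.Str.isIn "/essentiality" path = false := by rwa [Bool.not_eq_true] at g8
  by_cases g9 : PySem.Str.isIn "/fitness" path = true
  · rw [g0, g1, g2, g3, g4, g5, g6, g7, g8, g9]
    rfl
  replace g9 : PySem.Str.isIn "/fitness" path = false := by rwa [Bool.not_eq_true] at g9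
  by_cases g10 : PySem.Str.isIn "/mutant-growth" path = true
  · rw [g0, g1, g2, g3, g4, g5, g6, g7, g8, g9, g10]
    rfl
  replace g10 : PySem.Str.isIn "/mutant-growth" path = false := by rwa [Bool.not_eq_true] at g10
  by_cases g11 : PySem.Str.isIn "/reactions" path = true
  · rw [g0, g1, g2, g3, g4, g5, g6, g7, g8, g9, g10, g11]
    rfl
  replace g11 : PySem.Str.isIn "/reactions" path = false := by rwa [Bool.not_eq_true] at g11
  by_cases g12 : PySem.Str.isIn "/operons" path = true
  · rw [g0, g1, g2, g3, g4, g5, g6, g7, g8, g9, g10, g11, g12]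
    rfl
  replace g12 : PySem.Str.isIn "/operons" path = false := by rwa [Bool.not_eq_true] at g12
  by_cases g13 : PySem.Str.isIn "/orthologs" path = true
  · rw [g0, g1, g2, g3, g4, g5, g6, g7, g8, g9, g10, g11, g12, g13]
    rfl
  replace g13 : PySem.Str.isIn "/orthologs" path = false := by rwa [Bool.not_eq_true] at g13
  by_cases g14 : PySem.Str.isIn "/ppi" path = true
  · rw [g0, g1, g2, g3, g4, g5, g6, g7, g8, g9, g10, g11, g12, g13, g14]
    rfl
  replace g14 : PySem.Str.isIn "/ppi" path = false := by rwa [Bool.not_eq_true] at g14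
  by_cases g15 : PySem.Str.isIn "/ttp" path = true
  · rw [g0, g1, g2, g3, g4, g5, g6, g7, g8, g9, g10, g11, g12, g13, g14, g15]
    rfl
  replace g15 : PySem.Str.isIn "/ttp" path = false := by rwa [Bool.not_eq_true] at g15
  by_cases g16 : PySem.Str.isIn "/pyhmmer" path = true
  · rw [g0, g1, g2, g3, g4, g5, g6, g7, g8, g9, g10, g11, g12, g13, g14, g15, g16]
    rfl
  replace g16 : PySem.Str.isIn "/pyhmmer" path = false := by rwa [Bool.not_eq_true] at g16
  rw [g0, g1, g2, g3, g4, g5, g6, g7, g8, g9, g10, g11, g12, g13, g14, g15, g16]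
  rfl

-- ===== VERDICT (by name: the statement is the Claim_ definition above) =====
theorem categorize_endpoint_spec : Claim_equal_categorize_endpoint := by
  intro path tags _
  unfold Spec_categorize_endpoint categorize_endpoint categorize_endpoint_alt
  have hmap : pvCategoryMap = pvRules.map (fun r => (r.2.2, r.1)) := rfl
  rw [hmap, pvTagLoopA_eq, pvFoldTags_eq_scan, pvPathFold_eq]
  cases pvScanR tags pvRules with
  | none => exact (pvPathChain_eq path).symm
  | some b => rfl
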